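-- pv_equiv track=rewrite | github.com/miliar/Code_Jam_Webscraper | solutions_python/Problem_181/989.py | helper
-- ===== SOURCE A (Python) =====
-- def helper(phr):
-- 	best_phr = phr[0]
-- 	for ch in phr[1:]:
-- 		if ord(ch) >= ord(best_phr[0]):
-- 			best_phr = ch + best_phr
-- 		else:
-- 			best_phr = best_phr + ch
-- 	return best_phr
-- ===== SOURCE B (Python) =====
-- def helper(phr):
--     # pass 1: prefix maxima of phr
--     pm = []
--     m = phr[0]
--     for ch in phr:
--         if ch > m:
--             m = ch
--         pm.append(m)
--     # pass 2: a char is a "record" iff it equals its prefix maximum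
--     front = [ch for ch, mx in zip(phr, pm) if ch == mx]
--     back = [ch for ch, mx in zip(phr, pm) if ch != mx]
--     return ''.join(reversed(front)) + ''.join(back)
-- ===== Notes on version B (the rewrite author's own statement) =====
-- stated objective: faster
-- what changed: B is staged: it first computes the whole prefix-maxima list of phr, then classifies each character by equality with its prefix maximum (equal = record, goes to the reversed front group; otherwise the back group) and joins once, instead of A's per-character prepend/append rebuilding of the result string.
import Mathlib
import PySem

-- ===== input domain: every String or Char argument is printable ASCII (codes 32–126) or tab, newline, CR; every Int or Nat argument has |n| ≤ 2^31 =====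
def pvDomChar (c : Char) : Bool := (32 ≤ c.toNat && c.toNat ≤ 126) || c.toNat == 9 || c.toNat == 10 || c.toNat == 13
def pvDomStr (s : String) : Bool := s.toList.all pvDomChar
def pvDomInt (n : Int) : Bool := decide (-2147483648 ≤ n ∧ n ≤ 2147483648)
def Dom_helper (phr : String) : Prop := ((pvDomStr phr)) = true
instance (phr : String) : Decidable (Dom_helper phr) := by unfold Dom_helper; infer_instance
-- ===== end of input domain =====

-- B replaces A's per-char prepend/append string rebuilding by a staged algorithm:
-- compute the prefix-maxima list, classify chars by equality with their prefix
-- maximum, and join once (objective: faster).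

-- ===== PORT A =====
-- the loop: for ch in phr[1:], prepend if ord(ch) >= ord(best[0]) else append
def helperLoop (best : List Char) (rest : List Char) : List Char :=
  rest.foldl (fun b ch => if (b.headD ' ').toNat ≤ ch.toNat then ch :: b else b ++ [ch]) best

def helper (phr : String) : String :=
  match phr.toList with
  | [] => ""            -- Python raises IndexError on phr[0]; excluded by Pre_helper
  | c :: rest => String.mk (helperLoop [c] rest)

-- ===== PORT B =====
-- pass 1: prefix maxima (Python's `ch > m` on 1-char strings is code-point order = toNat order)
def pmAux (m : Char) : List Char → List Char
  | [] => []
  | ch :: xs =>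
    let m' := if m.toNat < ch.toNat then ch else m
    m' :: pmAux m' xs

def helper_alt (phr : String) : String :=
  match phr.toList with
  | [] => ""            -- Python raises IndexError on phr[0]; excluded by Pre_helper
  | c :: rest =>
    let cs := c :: rest
    let pm := pmAux c cs
    let front := ((cs.zip pm).filter (fun p => p.1 == p.2)).map Prod.fst
    let back := ((cs.zip pm).filter (fun p => !(p.1 == p.2))).map Prod.fst
    String.mk (front.reverse ++ back)

-- ===== PRECONDITION & SPEC =====
-- A (and B) raise IndexError on the empty string (phr[0]); excluded.
def Pre_helper (phr : String) : Prop := phr ≠ ""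
instance (phr : String) : Decidable (Pre_helper phr) := by unfold Pre_helper; infer_instance
def pvWitness_helper : String := "ba"

def Spec_helper (phr : String) (out : String) : Prop := out = helper_alt phr
instance (phr : String) (out : String) : Decidable (Spec_helper phr out) := by unfold Spec_helper; infer_instance

-- ===== CLAIM (what is proved, stated in full; the proofs are below) =====
def Claim_equal_helper : Prop := ∀ (phr : String), Dom_helper phr → Pre_helper phr → Spec_helper phr (helper phr)

-- ===== LEMMAS AND PROOFS =====

-- recursive views of B's zip/filter passes (proof-side only)
def frontOf (m : Char) : List Char → List Char
  | [] => []
  | ch :: xs =>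
    let m' := if m.toNat < ch.toNat then ch else m
    if ch == m' then ch :: frontOf m' xs else frontOf m' xs

def backOf (m : Char) : List Char → List Char
  | [] => []
  | ch :: xs =>
    let m' := if m.toNat < ch.toNat then ch else m
    if ch == m' then backOf m' xs else ch :: backOf m' xs

theorem front_eq (m : Char) (xs : List Char) :
    ((xs.zip (pmAux m xs)).filter (fun p => p.1 == p.2)).map Prod.fst = frontOf m xs := by
  induction xs generalizing m with
  | nil => rfl
  | cons ch xs ih =>
    simp only [pmAux, frontOf, List.zip_cons_cons, List.filter_cons]
    split_ifs with h <;> simp_all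

theorem back_eq (m : Char) (xs : List Char) :
    ((xs.zip (pmAux m xs)).filter (fun p => !(p.1 == p.2))).map Prod.fst = backOf m xs := by
  induction xs generalizing m with
  | nil => rfl
  | cons ch xs ih =>
    simp only [pmAux, backOf, List.zip_cons_cons, List.filter_cons]
    split_ifs with h <;> simp_all

theorem toNat_inj {a b : Char} (h : a.toNat = b.toNat) : a = b := by
  apply Char.ext
  apply UInt32.toNat_inj.mp
  exact h

-- invariant: A's best string is f.reverse ++ b (f = records so far, whose last is the
-- running max m); B's remaining classification appends to f and b respectively.
theorem loop_eq (rest f b : List Char) (m : Char)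
    (hf : f ≠ []) (hm : f.getLast? = some m) :
    helperLoop (f.reverse ++ b) rest =
      (f ++ frontOf m rest).reverse ++ (b ++ backOf m rest) := by
  induction rest generalizing f b m with
  | nil => simp [helperLoop, frontOf, backOf]
  | cons ch rest ih =>
    have hhead : (f.reverse ++ b).headD ' ' = m := by
      cases f with
      | nil => exact absurd rfl hf
      | cons x xs =>
        have : (x :: xs).reverse.head? = some m := by
          rw [List.head?_reverse]; exact hm
        cases hrev : (x :: xs).reverse with
        | nil => simp [hrev] at this
        | cons y ys =>
          rw [hrev] at this
          simp at this
          simp [this]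
    simp only [helperLoop, List.foldl_cons] at *
    rw [hhead]
    by_cases hc : m.toNat ≤ ch.toNat
    · have hm' : (if m.toNat < ch.toNat then ch else m) = ch := by
        split_ifs with h
        · rfl
        · exact toNat_inj (by omega)
      simp only [hc, if_pos, frontOf, backOf, hm', beq_self_eq_true]
      have h1 : ch :: (f.reverse ++ b) = (f ++ [ch]).reverse ++ b := by simp
      rw [h1, ih (f ++ [ch]) b ch (by simp) (by simp)]
      simp
    · have hlt : ch.toNat < m.toNat := by omega
      have hm' : (if m.toNat < ch.toNat then ch else m) = m := by
        split_ifs with h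
        · omega
        · rfl
      have hne : (ch == m) = false := by
        apply beq_eq_false_iff_ne.mpr
        intro h; subst h; omega
      simp only [hc, if_neg, not_false_iff, frontOf, backOf, hm', hne,
        Bool.false_eq_true]
      have h1 : (f.reverse ++ b) ++ [ch] = f.reverse ++ (b ++ [ch]) := by simp
      rw [h1, ih f (b ++ [ch]) m hf hm]
      simp

-- ===== VERDICT (by name: the statement is the Claim_ definition above) =====
theorem helper_spec : Claim_equal_helper := by
  intro phr _ _
  unfold Spec_helper helper helper_alt
  cases h : phr.toList with
  | nil => rfl
  | cons c rest =>
    simp only [front_eq, back_eq]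
    have hfr : frontOf c (c :: rest) = c :: frontOf c rest := by
      simp [frontOf]
    have hbk : backOf c (c :: rest) = backOf c rest := by
      simp [backOf]
    rw [hfr, hbk]
    have := loop_eq rest [c] [] c (by simp) (by simp)
    simp only [List.reverse_singleton, List.append_nil] at this
    rw [this]
    simp
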